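-- pv_equiv track=rewrite | github.com/Burla-Cloud/burla | main_service/src/main_service/endpoints/cluster_lifecycle.py | _pack_n4_standard_machines
-- ===== SOURCE A (Python) =====
-- N4_STANDARD_SIZES_DESCENDING = (80, 64, 32, 16, 8, 4, 2)
--
-- def _pack_n4_standard_machines(num_cpus: int) -> list[str]:
--     """
--     Pick n4-standard machine types that cover `num_cpus`, greedily using as
--     many of the largest size as possible and covering any remainder with the
--     smallest size that fits. e.g. 95 -> [n4-standard-80, n4-standard-16].
--     """
--     machines = []
--     largest = N4_STANDARD_SIZES_DESCENDING[0]
--     remaining = num_cpus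
--     while remaining >= largest:
--         machines.append(f"n4-standard-{largest}")
--         remaining -= largest
--     if remaining > 0:
--         for size in reversed(N4_STANDARD_SIZES_DESCENDING):
--             if size >= remaining:
--                 machines.append(f"n4-standard-{size}")
--                 break
--     return machines
-- ===== SOURCE B (Python) =====
-- N4_STANDARD_SIZES_DESCENDING = (80, 64, 32, 16, 8, 4, 2)
--
-- def _pack_n4_standard_machines(num_cpus: int) -> list[str]:
--     count = max(num_cpus, 0) // 80
--     machines = ["n4-standard-80"] * count
--     remaining = num_cpus - count * 80
--     if remaining > 0:
--         smallest = min(s for s in N4_STANDARD_SIZES_DESCENDING if s >= remaining)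
--         machines.append(f"n4-standard-{smallest}")
--     return machines
-- ===== Notes on version B (the rewrite author's own statement) =====
-- stated objective: simpler
-- what changed: Replaces the subtract-and-count while-loop and the break-out for-loop with a closed form: integer division gives the bulk machine count via list multiplication, and the remainder's cover is the min of the sizes that fit.
import Mathlib
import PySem

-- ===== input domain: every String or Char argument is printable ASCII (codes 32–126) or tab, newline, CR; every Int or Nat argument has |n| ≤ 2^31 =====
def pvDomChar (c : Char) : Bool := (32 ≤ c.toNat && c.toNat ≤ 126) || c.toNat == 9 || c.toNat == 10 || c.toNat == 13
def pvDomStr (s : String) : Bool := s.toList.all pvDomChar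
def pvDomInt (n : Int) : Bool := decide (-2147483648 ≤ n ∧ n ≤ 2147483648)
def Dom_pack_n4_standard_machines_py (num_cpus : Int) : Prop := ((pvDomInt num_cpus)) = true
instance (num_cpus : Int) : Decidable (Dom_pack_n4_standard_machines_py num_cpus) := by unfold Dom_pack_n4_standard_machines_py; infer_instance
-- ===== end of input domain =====

-- B replaces A's subtract-80 while-loop and break-out for-loop by a division closed form
-- (count = max(n,0)//80, bulk by list multiplication, remainder covered by min of fitting sizes);
-- objective: simpler.

-- ===== PORT A =====
def n4SizesDescending : List Int := [80, 64, 32, 16, 8, 4, 2]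

-- the while-loop of A: append "n4-standard-80" while remaining >= largest
def packLoopA (machines : List String) (largest : Int) (remaining : Int)
    (hpos : 0 < largest) : List String × Int :=
  if _h : remaining ≥ largest then
    packLoopA (machines ++ ["n4-standard-" ++ PySem.Int.toStr largest]) largest (remaining - largest) hpos
  else
    (machines, remaining)
termination_by remaining.toNat
decreasing_by omega

-- the for-loop with break of A
def pickSizeA (machines : List String) (remaining : Int) : List Int → List String
  | [] => machines
  | s :: rest =>
    if s ≥ remaining then machines ++ ["n4-standard-" ++ PySem.Int.toStr s]
    else pickSizeA machines remaining rest

def pack_n4_standard_machines_py (num_cpus : Int) : List String :=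
  let machines : List String := []
  let largest : Int := n4SizesDescending.headI
  let (machines, remaining) := packLoopA machines largest num_cpus (by decide)
  if remaining > 0 then pickSizeA machines remaining n4SizesDescending.reverse
  else machines

-- ===== PORT B =====
def pack_n4_standard_machines_py_alt (num_cpus : Int) : List String :=
  let count := PySem.Int.floordiv (max num_cpus 0) 80
  let machines := List.replicate count.toNat "n4-standard-80"
  let remaining := num_cpus - count * 80
  if remaining > 0 then
    -- Python's min over the generator; the filter is never empty when this branch runs
    match PySem.List.min? (n4SizesDescending.filter (fun s => decide (s ≥ remaining))) (fun s => s) with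
    | some smallest => machines ++ ["n4-standard-" ++ PySem.Int.toStr smallest]
    | none => machines
  else machines

-- ===== PRECONDITION & SPEC =====
def Spec_pack_n4_standard_machines_py (num_cpus : Int) (out : List String) : Prop := out = pack_n4_standard_machines_py_alt num_cpus
instance (num_cpus : Int) (out : List String) : Decidable (Spec_pack_n4_standard_machines_py num_cpus out) := by unfold Spec_pack_n4_standard_machines_py; infer_instance

-- ===== CLAIM (what is proved, stated in full; the proofs are below) =====
def Claim_equal_pack_n4_standard_machines_py : Prop := ∀ (num_cpus : Int), Dom_pack_n4_standard_machines_py num_cpus → Spec_pack_n4_standard_machines_py num_cpus (pack_n4_standard_machines_py num_cpus)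

-- ===== LEMMAS AND PROOFS =====

theorem packLoopA_eq (n : Nat) : ∀ (r : Int), r.toNat = n → ∀ (ms : List String),
    packLoopA ms 80 r (by decide)
      = (ms ++ List.replicate (r.toNat / 80) "n4-standard-80", r - 80 * (r.toNat / 80 : Nat)) := by
  induction n using Nat.strong_induction_on with
  | _ n ih =>
    intro r hr ms
    rw [packLoopA]
    split
    · rename_i h
      rw [ih ((r - 80).toNat) (by omega) _ rfl]
      rw [Prod.mk.injEq]
      constructor
      · have h1 : r.toNat / 80 = (r - 80).toNat / 80 + 1 := by omega
        rw [h1, List.replicate_succ, List.append_assoc]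
        rfl
      · have h1 : r.toNat / 80 = (r - 80).toNat / 80 + 1 := by omega
        rw [h1]; push_cast; omega
    · rename_i h
      have h1 : r.toNat / 80 = 0 := by omega
      simp [h1]

-- the two remainder-cover expressions agree for 0 < r ≤ 80
theorem pick_eq (r : Int) (hr0 : 0 < r) (hr : r ≤ 80) (ms : List String) :
    pickSizeA ms r n4SizesDescending.reverse
      = (match PySem.List.min? (n4SizesDescending.filter (fun s => decide (s ≥ r))) (fun s => s) with
         | some smallest => ms ++ ["n4-standard-" ++ PySem.Int.toStr smallest]
         | none => ms) := by
  interval_cases r <;> rfl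

-- ===== VERDICT (by name: the statement is the Claim_ definition above) =====
theorem pack_n4_standard_machines_py_spec : Claim_equal_pack_n4_standard_machines_py := by
  intro num_cpus _
  unfold Spec_pack_n4_standard_machines_py
  unfold pack_n4_standard_machines_py pack_n4_standard_machines_py_alt
  have hhead : n4SizesDescending.headI = 80 := rfl
  simp only [hhead]
  rw [packLoopA_eq num_cpus.toNat num_cpus rfl]
  simp only [List.nil_append]
  have hcount : PySem.Int.floordiv (max num_cpus 0) 80 = (num_cpus.toNat / 80 : Nat) := by
    have h1 : max num_cpus 0 = ((num_cpus.toNat : Nat) : Int) := by omega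
    rw [h1]
    exact_mod_cast PySem.Int.floordiv_natCast num_cpus.toNat 80
  rw [hcount]
  have hrem : num_cpus - (num_cpus.toNat / 80 : Nat) * 80 = num_cpus - 80 * (num_cpus.toNat / 80 : Nat) := by ring
  rw [hrem]
  set q : Nat := num_cpus.toNat / 80 with hq
  set r : Int := num_cpus - 80 * (q : Int) with hrdef
  by_cases hpos : r > 0
  · simp only [if_pos hpos]
    rw [pick_eq r hpos (by omega)]
    simp
  · simp [if_neg hpos]
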